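-- pv_equiv track=rewrite | github.com/fduda/Intro_prog | Prova Final/find_change_points.py | find_change_point
-- ===== SOURCE A (Python) =====
-- def find_change_point(lst):
--     max_element = max(lst)
--     min_element = min(lst)
--
--     if max_element > lst[0]:
--         for index, element in enumerate(lst):
--             if element == max_element:
--                 return index
--
--     if min_element < lst[0]:
--         for index, element in enumerate(lst):
--             if element == min_element:
--                 return index
-- ===== SOURCE B (Python) =====
-- def find_change_point(lst):
--     if not lst:
--         raise ValueError("find_change_point() arg is an empty sequence")
--     head = lst[0]
--     max_val, max_idx = head, 0
--     min_val, min_idx = head, 0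
--     for i, x in enumerate(lst):
--         if x > max_val:
--             max_val, max_idx = x, i
--         if x < min_val:
--             min_val, min_idx = x, i
--     if max_val > head:
--         return max_idx
--     if min_val < head:
--         return min_idx
--     return None
-- ===== Notes on version B (the rewrite author's own statement) =====
-- stated objective: alternative
-- what changed: B makes one pass tracking running max/min values with their first indices instead of A's separate max(), min() and two index-search scans.
-- outside the precondition, e.g. on find_change_point([]): A raises ValueError, B raises ValueError
import Mathlib
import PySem

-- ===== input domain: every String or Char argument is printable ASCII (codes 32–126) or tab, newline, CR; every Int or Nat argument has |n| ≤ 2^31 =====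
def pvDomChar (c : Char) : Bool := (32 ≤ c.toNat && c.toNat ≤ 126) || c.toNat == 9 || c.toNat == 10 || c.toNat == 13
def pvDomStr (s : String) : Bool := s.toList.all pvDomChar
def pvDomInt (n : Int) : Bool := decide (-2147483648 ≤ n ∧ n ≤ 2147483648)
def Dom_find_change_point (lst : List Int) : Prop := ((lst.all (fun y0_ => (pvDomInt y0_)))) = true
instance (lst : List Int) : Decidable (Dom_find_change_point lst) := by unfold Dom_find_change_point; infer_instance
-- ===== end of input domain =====

-- B replaces A's four scans (max(), min(), two index-search loops) by one pass tracking
-- running max/min with their first indices; objective: an alternative single-pass decomposition.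


-- ===== PORT A =====
-- A's 'for index, element in enumerate(lst): if element == target: return index'
def firstIdxA (lst : List Int) (target : Int) (i : Int) : Option Int :=
  match lst with
  | [] => none
  | x :: xs => if x = target then some i else firstIdxA xs target (i + 1)

def find_change_point (lst : List Int) : Option Int :=
  match PySem.List.max? lst (fun y => y), PySem.List.min? lst (fun y => y),
        PySem.List.pyGet? lst 0 with
  | some mx, some mn, some h0 =>
      if mx > h0 then firstIdxA lst mx 0
      else if mn < h0 then firstIdxA lst mn 0
      else none
  | _, _, _ => none   -- unreachable under Pre_ (max([]) raises ValueError)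

-- ===== PORT B =====
-- B's single loop over enumerate(lst) from index 1 (index 0 initialises the state)
def scanB (xs : List Int) (i mx mxi mn mni : Int) : Int × Int × Int × Int :=
  match xs with
  | [] => (mx, mxi, mn, mni)
  | x :: t =>
      let (mx', mxi') := if x > mx then (x, i) else (mx, mxi)
      let (mn', mni') := if x < mn then (x, i) else (mn, mni)
      scanB t (i + 1) mx' mxi' mn' mni'

def find_change_point_alt (lst : List Int) : Option Int :=
  match lst with
  | [] => none   -- B raises ValueError here; excluded by Pre_
  | x :: xs =>
      let (mx, mxi, mn, mni) := scanB xs 1 x 0 x 0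
      if mx > x then some mxi
      else if mn < x then some mni
      else none

-- ===== PRECONDITION & SPEC =====
-- Pre_ excludes exactly the empty list, on which A raises ValueError (max([])).
def Pre_find_change_point (lst : List Int) : Prop := lst ≠ []
instance (lst : List Int) : Decidable (Pre_find_change_point lst) := by unfold Pre_find_change_point; infer_instance
def pvWitness_find_change_point : List Int := [1, 3, 2]

def Spec_find_change_point (lst : List Int) (out : Option Int) : Prop := out = find_change_point_alt lst
instance (lst : List Int) (out : Option Int) : Decidable (Spec_find_change_point lst out) := by unfold Spec_find_change_point; infer_instance

-- ===== CLAIM (what is proved, stated in full; the proofs are below) =====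
def Claim_equal_find_change_point : Prop := ∀ (lst : List Int), Dom_find_change_point lst → Pre_find_change_point lst → Spec_find_change_point lst (find_change_point lst)

-- ===== LEMMAS AND PROOFS =====

theorem scanB_fst (xs : List Int) (i mx mxi mn mni : Int) :
    (scanB xs i mx mxi mn mni).1 = xs.foldl max mx := by
  induction xs generalizing i mx mxi mn mni with
  | nil => rfl
  | cons x t ih =>
      simp only [scanB, List.foldl]
      split_ifs with h1 h2 h2 <;> simp_all [le_of_lt, le_of_not_gt]

theorem scanB_min (xs : List Int) (i mx mxi mn mni : Int) :
    (scanB xs i mx mxi mn mni).2.2.1 = xs.foldl min mn := by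
  induction xs generalizing i mx mxi mn mni with
  | nil => rfl
  | cons x t ih =>
      simp only [scanB, List.foldl]
      split_ifs with h1 h2 h2 <;> simp_all [le_of_lt, le_of_not_gt]

theorem scanB_mxi_stable (xs : List Int) (i mx mxi mn mni : Int)
    (h : ∀ y ∈ xs, y ≤ mx) :
    (scanB xs i mx mxi mn mni).2.1 = mxi := by
  induction xs generalizing i mx mxi mn mni with
  | nil => rfl
  | cons x t ih =>
      simp only [scanB]
      have hx : ¬ x > mx := not_lt.mpr (h x (List.mem_cons_self ..))
      rw [if_neg hx]
      split_ifs <;> exact ih _ _ _ _ _ (fun y hy => h y (List.mem_cons_of_mem _ hy))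

theorem scanB_mni_stable (xs : List Int) (i mx mxi mn mni : Int)
    (h : ∀ y ∈ xs, mn ≤ y) :
    (scanB xs i mx mxi mn mni).2.2.2 = mni := by
  induction xs generalizing i mx mxi mn mni with
  | nil => rfl
  | cons x t ih =>
      simp only [scanB]
      have hx : ¬ x < mn := not_lt.mpr (h x (List.mem_cons_self ..))
      rw [if_neg hx]
      split_ifs <;> exact ih _ _ _ _ _ (fun y hy => h y (List.mem_cons_of_mem _ hy))

theorem scanB_mxi_find (xs : List Int) (i mx mxi mn mni : Int)
    (h : mx < xs.foldl max mx) :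
    firstIdxA xs (xs.foldl max mx) i = some (scanB xs i mx mxi mn mni).2.1 := by
  induction xs generalizing i mx mxi mn mni with
  | nil => simp at h
  | cons x t ih =>
      simp only [List.foldl, scanB, firstIdxA]
      rcases lt_or_ge mx x with hx | hx
      · rw [if_pos hx, max_eq_right hx.le]
        by_cases hfix : x < t.foldl max x
        · have hne : x ≠ t.foldl max x := ne_of_lt hfix
          rw [if_neg hne]
          split_ifs with h2
          · exact ih (i+1) x i x i hfix
          · exact ih (i+1) x i mn mni hfix
        · have hfe : t.foldl max x = x :=
            le_antisymm (not_lt.mp hfix) (PySem.List.le_foldl_max t x).1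
          rw [hfe, if_pos rfl]
          split_ifs with h2
          · rw [scanB_mxi_stable]
            intro y hy
            calc y ≤ t.foldl max x := (PySem.List.le_foldl_max t x).2 y hy
              _ = x := hfe
          · rw [scanB_mxi_stable]
            intro y hy
            calc y ≤ t.foldl max x := (PySem.List.le_foldl_max t x).2 y hy
              _ = x := hfe
      · have h' : mx < t.foldl max mx := by
          simpa [List.foldl, max_eq_left hx] using h
        rw [if_neg (not_lt.mpr hx), max_eq_left hx]
        have hne : x ≠ t.foldl max mx := by
          intro he; rw [← he] at h'; exact absurd h' (not_lt.mpr hx)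
        rw [if_neg hne]
        split_ifs with h2
        · exact ih (i+1) mx mxi x i h'
        · exact ih (i+1) mx mxi mn mni h'

theorem scanB_mni_find (xs : List Int) (i mx mxi mn mni : Int)
    (h : xs.foldl min mn < mn) :
    firstIdxA xs (xs.foldl min mn) i = some (scanB xs i mx mxi mn mni).2.2.2 := by
  induction xs generalizing i mx mxi mn mni with
  | nil => simp at h
  | cons x t ih =>
      simp only [List.foldl, scanB, firstIdxA]
      rcases lt_or_ge x mn with hx | hx
      · rw [if_pos hx, min_eq_right hx.le]
        by_cases hfix : t.foldl min x < x
        · have hne : x ≠ t.foldl min x := (ne_of_lt hfix).symm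
          rw [if_neg hne]
          split_ifs with h2
          · exact ih (i+1) x i x i hfix
          · exact ih (i+1) mx mxi x i hfix
        · have hfe : t.foldl min x = x :=
            le_antisymm (PySem.List.foldl_min_le t x).1 (not_lt.mp hfix)
          rw [hfe, if_pos rfl]
          split_ifs with h2 <;>
          · rw [scanB_mni_stable]
            intro y hy
            calc x = t.foldl min x := hfe.symm
              _ ≤ y := (PySem.List.foldl_min_le t x).2 y hy
      · have h' : t.foldl min mn < mn := by
          simpa [List.foldl, min_eq_left hx] using h
        rw [if_neg (not_lt.mpr hx), min_eq_left hx]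
        have hne : x ≠ t.foldl min mn := by
          intro he; rw [← he] at h'; exact absurd h' (not_lt.mpr hx)
        rw [if_neg hne]
        split_ifs with h2
        · exact ih (i+1) x i mn mni h'
        · exact ih (i+1) mx mxi mn mni h'

-- ===== VERDICT (by name: the statement is the Claim_ definition above) =====
theorem find_change_point_spec : Claim_equal_find_change_point := by
  intro lst _ hpre
  match lst with
  | [] => exact absurd rfl hpre
  | x :: xs =>
      unfold Spec_find_change_point find_change_point find_change_point_alt
      rw [PySem.List.max?_id_cons, PySem.List.min?_id_cons]
      have hg : PySem.List.pyGet? (x :: xs) 0 = some x := by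
        simp [PySem.List.pyGet?, PySem.List.pyIdx?]
      rw [hg]
      simp only []
      rcases hs : scanB xs 1 x 0 x 0 with ⟨mx, mxi, mn, mni⟩
      have hmx : mx = xs.foldl max x := by
        have h2 := scanB_fst xs 1 x 0 x 0; rw [hs] at h2
        simp only at h2; omega
      have hmn : mn = xs.foldl min x := by
        have h2 := scanB_min xs 1 x 0 x 0; rw [hs] at h2
        simp only at h2; omega
      subst hmx hmn
      split_ifs with h1 h2
      · rw [firstIdxA, if_neg (ne_of_gt h1).symm]
        have := scanB_mxi_find xs 1 x 0 x 0 h1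
        rw [hs] at this; exact this
      · rw [firstIdxA, if_neg (ne_of_lt h2).symm]
        have := scanB_mni_find xs 1 x 0 x 0 h2
        rw [hs] at this; exact this
      · rfl
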